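-- pv_equiv track=rewrite | github.com/pedroarrudaa/one_project | app/services/scoring_v1.py | _resolve_company_tier
-- ===== SOURCE A (Python) =====
-- def _resolve_company_tier(company_name: str) -> str:
--     """Resolve company tier based on company name (integrated from V2)."""
--     if not company_name or company_name == "N/A":
--         return "D"
--
--     company_lower = company_name.lower()
--
--     # Tier A: FAANG + Top Tech
--     tier_a = ["google", "apple", "meta", "facebook", "amazon", "netflix", "microsoft", "nvidia", "openai", "anthropic"]
--     if any(company in company_lower for company in tier_a):
--         return "A"
--
--     # Tier A-: High-tier tech companies
--     tier_a_minus = ["uber", "airbnb", "stripe", "spotify", "twitter", "x corp", "tesla", "spacex", "palantir"]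
--     if any(company in company_lower for company in tier_a_minus):
--         return "A-"
--
--     # Tier B: Established tech companies
--     tier_b = ["oracle", "salesforce", "adobe", "intel", "ibm", "cisco", "vmware", "snowflake", "databricks", "atlassian"]
--     if any(company in company_lower for company in tier_b):
--         return "B"
--
--     # Tier C: Mid-tier companies
--     tier_c = ["startup", "consulting", "accenture", "deloitte", "pwc", "kpmg", "ey"]
--     if any(company in company_lower for company in tier_c):
--         return "C"
--
--     # Default to D for unknown companies
--     return "D"
-- ===== SOURCE B (Python) =====
-- def _resolve_company_tier(company_name: str) -> str:
--     """Single-pass variant: collect every matching keyword's priority rank, return the best (minimum) rank's tier."""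
--     if not company_name or company_name == "N/A":
--         return "D"
--
--     company_lower = company_name.lower()
--
--     tier_a = ["google", "apple", "meta", "facebook", "amazon", "netflix", "microsoft", "nvidia", "openai", "anthropic"]
--     tier_a_minus = ["uber", "airbnb", "stripe", "spotify", "twitter", "x corp", "tesla", "spacex", "palantir"]
--     tier_b = ["oracle", "salesforce", "adobe", "intel", "ibm", "cisco", "vmware", "snowflake", "databricks", "atlassian"]
--     tier_c = ["startup", "consulting", "accenture", "deloitte", "pwc", "kpmg", "ey"]
--
--     entries = [(kw, rank) for rank, kws in enumerate([tier_a, tier_a_minus, tier_b, tier_c]) for kw in kws]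
--
--     best = 4  # sentinel rank: no keyword matched
--     for kw, rank in entries:
--         if kw in company_lower and rank < best:
--             best = rank
--
--     return ["A", "A-", "B", "C", "D"][best]
-- ===== Notes on version B (the rewrite author's own statement) =====
-- stated objective: alternative
-- what changed: Replaced the four ordered short-circuit any(...) tier checks with a single pass over a flat keyword-to-rank list that records the minimum matching rank and maps it back to a tier label.
import Mathlib
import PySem

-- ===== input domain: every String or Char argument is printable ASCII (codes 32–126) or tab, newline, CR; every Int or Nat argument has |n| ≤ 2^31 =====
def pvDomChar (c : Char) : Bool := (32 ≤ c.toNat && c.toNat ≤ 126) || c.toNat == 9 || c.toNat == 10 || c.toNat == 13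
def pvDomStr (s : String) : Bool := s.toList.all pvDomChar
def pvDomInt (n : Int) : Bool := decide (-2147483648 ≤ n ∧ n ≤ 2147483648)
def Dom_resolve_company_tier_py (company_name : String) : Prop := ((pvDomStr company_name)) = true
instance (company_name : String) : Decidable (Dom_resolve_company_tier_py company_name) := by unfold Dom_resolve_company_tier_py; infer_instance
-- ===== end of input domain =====

-- B replaces A's four ordered short-circuit `any` passes by one min-rank pass over a flat keyword→rank list (objective: alternative decomposition, same cost).

-- ===== PORT A =====
def pvTierA : List String := ["google", "apple", "meta", "facebook", "amazon", "netflix", "microsoft", "nvidia", "openai", "anthropic"]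
def pvTierAm : List String := ["uber", "airbnb", "stripe", "spotify", "twitter", "x corp", "tesla", "spacex", "palantir"]
def pvTierB : List String := ["oracle", "salesforce", "adobe", "intel", "ibm", "cisco", "vmware", "snowflake", "databricks", "atlassian"]
def pvTierC : List String := ["startup", "consulting", "accenture", "deloitte", "pwc", "kpmg", "ey"]

def resolve_company_tier_py (company_name : String) : String :=
  if company_name = "" ∨ company_name = "N/A" then "D"
  else
    let company_lower := PySem.Str.lower company_name
    if pvTierA.any (fun c => PySem.Str.isIn c company_lower) then "A"
    else if pvTierAm.any (fun c => PySem.Str.isIn c company_lower) then "A-"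
    else if pvTierB.any (fun c => PySem.Str.isIn c company_lower) then "B"
    else if pvTierC.any (fun c => PySem.Str.isIn c company_lower) then "C"
    else "D"

-- ===== PORT B =====
-- one fold step of B's single pass: keep the smaller rank when the keyword matches
def pvStep (cl : String) (best : Nat) (e : String × Nat) : Nat :=
  if PySem.Str.isIn e.1 cl = true ∧ e.2 < best then e.2 else best

def pvEntries : List (String × Nat) :=
  pvTierA.map (fun k => (k, 0)) ++ pvTierAm.map (fun k => (k, 1)) ++
  pvTierB.map (fun k => (k, 2)) ++ pvTierC.map (fun k => (k, 3))

def resolve_company_tier_py_alt (company_name : String) : String :=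
  if company_name = "" ∨ company_name = "N/A" then "D"
  else
    let company_lower := PySem.Str.lower company_name
    let best := pvEntries.foldl (pvStep company_lower) 4
    -- Python's labels[best]: best is always in [0,4], so in-range indexing = getD
    (["A", "A-", "B", "C", "D"] : List String).getD best "D"

-- ===== PRECONDITION & SPEC =====
def Spec_resolve_company_tier_py (company_name : String) (out : String) : Prop := out = resolve_company_tier_py_alt company_name
instance (company_name : String) (out : String) : Decidable (Spec_resolve_company_tier_py company_name out) := by unfold Spec_resolve_company_tier_py; infer_instance

-- ===== CLAIM (what is proved, stated in full; the proofs are below) =====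
def Claim_equal_resolve_company_tier_py : Prop := ∀ (company_name : String), Dom_resolve_company_tier_py company_name → Spec_resolve_company_tier_py company_name (resolve_company_tier_py company_name)

-- ===== LEMMAS AND PROOFS =====

-- folding one constant-rank segment: drop to r iff some keyword matches and r improves
theorem pvSeg_fold (kws : List String) (r : Nat) (cl : String) (acc : Nat) :
    (kws.map (fun k => (k, r))).foldl (pvStep cl) acc =
      if kws.any (fun k => PySem.Str.isIn k cl) = true ∧ r < acc then r else acc := by
  induction kws generalizing acc with
  | nil => simp
  | cons k t ih =>
    simp only [List.map_cons, List.foldl_cons, List.any_cons, pvStep]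
    by_cases hk : PySem.Str.isIn k cl = true <;>
      by_cases hr : r < acc <;>
        simp [ih, hk, hr, Nat.lt_irrefl, -List.any_eq_true, -PySem.Str.isIn_eq]

theorem resolve_company_tier_py_eq (company_name : String) :
    resolve_company_tier_py company_name = resolve_company_tier_py_alt company_name := by
  unfold resolve_company_tier_py resolve_company_tier_py_alt
  by_cases hg : company_name = "" ∨ company_name = "N/A"
  · simp [hg]
  · simp only [hg, if_false]
    set cl := PySem.Str.lower company_name with hcl
    have hfold : pvEntries.foldl (pvStep cl) 4 =
        if pvTierA.any (fun c => PySem.Str.isIn c cl) = true then 0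
        else if pvTierAm.any (fun c => PySem.Str.isIn c cl) = true then 1
        else if pvTierB.any (fun c => PySem.Str.isIn c cl) = true then 2
        else if pvTierC.any (fun c => PySem.Str.isIn c cl) = true then 3
        else 4 := by
      unfold pvEntries
      rw [List.foldl_append, List.foldl_append, List.foldl_append,
          pvSeg_fold, pvSeg_fold, pvSeg_fold, pvSeg_fold]
      by_cases h0 : pvTierA.any (fun c => PySem.Str.isIn c cl) = true <;>
        by_cases h1 : pvTierAm.any (fun c => PySem.Str.isIn c cl) = true <;>
          by_cases h2 : pvTierB.any (fun c => PySem.Str.isIn c cl) = true <;>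
            by_cases h3 : pvTierC.any (fun c => PySem.Str.isIn c cl) = true <;>
              simp [h0, h1, h2, h3, -List.any_eq_true, -PySem.Str.isIn_eq]
    rw [hfold]
    split_ifs <;> rfl

-- ===== VERDICT (by name: the statement is the Claim_ definition above) =====
theorem resolve_company_tier_py_spec : Claim_equal_resolve_company_tier_py := by
  intro company_name _
  unfold Spec_resolve_company_tier_py
  exact resolve_company_tier_py_eq company_name
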